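-- pv_equiv track=rewrite | github.com/Shrimathiuk/Shrimathi_Guvi_Tasks | Task3_5.py | distribute_mangoes
-- ===== SOURCE A (Python) =====
-- def distribute_mangoes(mangoes, students):
--     if students <= 0:
--         return "Number of students must be greater than zero."
--
--     mangoes_per_student = mangoes // students
--     remaining_mangoes = mangoes % students
--
--     distribution = [mangoes_per_student] * students
--
--     for i in range(remaining_mangoes):
--         distribution[i] += 1
--
--     return distribution
-- ===== SOURCE B (Python) =====
-- def distribute_mangoes(mangoes, students):
--     if students <= 0:
--         return "Number of students must be greater than zero."
--     result = []
--     m, s = mangoes, students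
--     while s > 0:
--         share = -((-m) // s)  # ceiling division: this student's fair share
--         result.append(share)
--         m -= share
--         s -= 1
--     return result
-- ===== Notes on version B (the rewrite author's own statement) =====
-- stated objective: alternative
-- what changed: Replaces the global divmod + uniform fill + increment-loop with a greedy single pass: each student in turn receives the ceiling of remaining_mangoes/remaining_students, maintaining (m, s) as running state; no quotient/remainder of the whole pile is ever computed.
import Mathlib
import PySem

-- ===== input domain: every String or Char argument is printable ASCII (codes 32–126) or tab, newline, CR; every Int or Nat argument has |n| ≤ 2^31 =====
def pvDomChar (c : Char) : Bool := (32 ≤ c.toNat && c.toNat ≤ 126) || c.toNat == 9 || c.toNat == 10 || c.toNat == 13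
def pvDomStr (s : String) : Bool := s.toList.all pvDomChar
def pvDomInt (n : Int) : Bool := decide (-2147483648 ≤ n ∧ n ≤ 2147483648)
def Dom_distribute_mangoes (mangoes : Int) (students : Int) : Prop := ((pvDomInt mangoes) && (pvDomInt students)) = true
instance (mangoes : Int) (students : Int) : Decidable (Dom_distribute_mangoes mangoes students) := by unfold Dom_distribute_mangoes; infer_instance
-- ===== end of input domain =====

-- B replaces A's global divmod + uniform fill + increment loop by a greedy single
-- pass giving each student the ceiling of remaining/left; objective: alternative.


-- ===== PORT A =====
-- A's `distribution[i] += 1` always has 0 ≤ i < len(distribution) here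
-- (i < mangoes % students < students = length), so `set i.toNat (getD i.toNat 0 + 1)` is exact.
def distribute_mangoes (mangoes : Int) (students : Int) : List Int :=
  if students ≤ 0 then []   -- Python returns a string here; excluded by Pre_
  else
    let mangoes_per_student := PySem.Int.floordiv mangoes students
    let remaining_mangoes := PySem.Int.mod mangoes students
    let distribution := List.replicate students.toNat mangoes_per_student
    (PySem.List.pyRange 0 remaining_mangoes 1).foldl
      (fun d i => d.set i.toNat (d.getD i.toNat 0 + 1)) distribution

-- ===== PORT B =====
-- B's while loop runs exactly s.toNat times (s decreases by 1 to 0), so the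
-- fuel-indexed recursion with fuel students.toNat is an exact transcription.
def altLoop (m s : Int) : Nat → List Int
  | 0 => []
  | Nat.succ k =>
      let share := -(PySem.Int.floordiv (-m) s)   -- -((-m) // s): ceiling division
      share :: altLoop (m - share) (s - 1) k

def distribute_mangoes_alt (mangoes : Int) (students : Int) : List Int :=
  if students ≤ 0 then []   -- Python returns the same guard string; excluded by Pre_
  else altLoop mangoes students students.toNat

-- ===== PRECONDITION & SPEC =====
-- Pre_ excludes students ≤ 0, where the Python returns the guard STRING, not a list of ints.
def Pre_distribute_mangoes (mangoes : Int) (students : Int) : Prop := 0 < students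
instance (mangoes : Int) (students : Int) : Decidable (Pre_distribute_mangoes mangoes students) := by unfold Pre_distribute_mangoes; infer_instance
def pvWitness_distribute_mangoes : Int × Int := (7, 3)

def Spec_distribute_mangoes (mangoes : Int) (students : Int) (out : List Int) : Prop := out = distribute_mangoes_alt mangoes students
instance (mangoes : Int) (students : Int) (out : List Int) : Decidable (Spec_distribute_mangoes mangoes students out) := by unfold Spec_distribute_mangoes; infer_instance

-- ===== CLAIM (what is proved, stated in full; the proofs are below) =====
def Claim_equal_distribute_mangoes : Prop := ∀ (mangoes : Int) (students : Int), Dom_distribute_mangoes mangoes students → Pre_distribute_mangoes mangoes students → Spec_distribute_mangoes mangoes students (distribute_mangoes mangoes students)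

-- ===== LEMMAS AND PROOFS =====

-- A's increment loop over the first r slots of a uniform list yields two blocks.
theorem inc_loop_eq_blocks (per : Int) (n r : Nat) (h : r ≤ n) :
    (PySem.List.pyRange 0 (r : Int) 1).foldl
      (fun d i => d.set i.toNat (d.getD i.toNat 0 + 1)) (List.replicate n per)
    = List.replicate r (per + 1) ++ List.replicate (n - r) per := by
  induction r with
  | zero => simp
  | succ r ih =>
    have hr : r ≤ n := Nat.le_of_succ_le h
    have hcast : ((r + 1 : Nat) : Int) = (r : Int) + 1 := by push_cast; ring
    rw [hcast, PySem.List.pyRange_one_succ_right (by positivity), List.foldl_append,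
        ih hr]
    simp only [List.foldl_cons, List.foldl_nil, Int.toNat_natCast]
    have hnr : n - r = (n - (r + 1)) + 1 := by omega
    rw [hnr, List.replicate_succ]
    rw [List.getD_eq_getElem?_getD, List.getElem?_append_right (by simp),
        List.set_append_right _ _ (by simp)]
    simp [List.replicate_succ']

-- B's greedy ceiling pass on m = q*n + r (0 ≤ r < n) produces the same two blocks.
theorem altLoop_blocks : ∀ (n : Nat) (q r : Int), 0 ≤ r → r < (n : Int) →
    altLoop (q * n + r) (n : Int) n
      = List.replicate r.toNat (q + 1) ++ List.replicate (n - r.toNat) q := by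
  intro n
  induction n with
  | zero => intro q r h0 h1; omega
  | succ n ih =>
    intro q r h0 h1
    by_cases hr : 0 < r
    · have hshare : -(PySem.Int.floordiv (-(q * ((n+1 : Nat) : Int) + r)) ((n+1 : Nat) : Int)) = q + 1 := by
        rw [PySem.Int.neg_floordiv_neg_eq_iff_of_pos (by exact_mod_cast Nat.succ_pos n)]
        have h1' : r < (n : Int) + 1 := by exact_mod_cast h1
        constructor <;> push_cast <;> nlinarith
      rw [altLoop]
      simp only [hshare]
      have harg : q * ((n+1 : Nat) : Int) + r - (q + 1) = q * (n : Int) + (r - 1) := by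
        push_cast; ring
      have hs : ((n+1 : Nat) : Int) - 1 = (n : Int) := by push_cast; ring
      rw [harg, hs, ih q (r - 1) (by omega) (by push_cast at h1 ⊢; omega)]
      have hrt : r.toNat = (r - 1).toNat + 1 := by omega
      rw [hrt]
      simp [List.replicate_succ, Nat.succ_sub_succ]
    · have hr0 : r = 0 := le_antisymm (not_lt.mp hr) h0
      subst hr0
      have hshare : -(PySem.Int.floordiv (-(q * ((n+1 : Nat) : Int) + 0)) ((n+1 : Nat) : Int)) = q := by
        rw [PySem.Int.neg_floordiv_neg_eq_iff_of_pos (by exact_mod_cast Nat.succ_pos n)]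
        constructor <;> push_cast <;> nlinarith
      rw [altLoop]
      simp only [hshare]
      have harg : q * ((n+1 : Nat) : Int) + 0 - q = q * (n : Int) + 0 := by push_cast; ring
      have hs : ((n+1 : Nat) : Int) - 1 = (n : Int) := by push_cast; ring
      rw [harg, hs]
      rcases Nat.eq_zero_or_pos n with hn | hn
      · subst hn; simp [altLoop]
      · rw [ih q 0 le_rfl (by exact_mod_cast hn)]
        simp [List.replicate_succ]

-- ===== VERDICT (by name: the statement is the Claim_ definition above) =====
theorem distribute_mangoes_spec : Claim_equal_distribute_mangoes := by
  intro mangoes students _ hpre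
  unfold Spec_distribute_mangoes distribute_mangoes distribute_mangoes_alt
  have hns : ¬ students ≤ 0 := not_le.mpr hpre
  simp only [if_neg hns]
  set per := PySem.Int.floordiv mangoes students with hper
  have hmodlo : 0 ≤ PySem.Int.mod mangoes students := PySem.Int.mod_nonneg mangoes hpre
  have hmodhi : PySem.Int.mod mangoes students < students := PySem.Int.mod_lt mangoes hpre
  set rem := PySem.Int.mod mangoes students with hrem
  have h1 : rem = ((rem.toNat : Nat) : Int) := (Int.toNat_of_nonneg hmodlo).symm
  have h2 : rem.toNat ≤ students.toNat := by omega
  have hsn : students = ((students.toNat : Nat) : Int) := by omega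
  have hm : mangoes = per * students + rem :=
    (PySem.Int.floordiv_mul_add_mod mangoes students).symm
  rw [h1, inc_loop_eq_blocks per students.toNat rem.toNat h2]
  conv_rhs => rw [hm, hsn]
  simp only [Int.toNat_natCast]
  rw [altLoop_blocks students.toNat per rem hmodlo (by omega)]
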